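-- pv_equiv track=rewrite | github.com/nkanven/CrytoBuyamSellam | arbitrage_trading/__init__.py | trade_ordering
-- ===== SOURCE A (Python) =====
-- def trade_ordering(arbitrage_pairs):
--     trade_order = {}
--     for pair in arbitrage_pairs:
--         for p in arbitrage_pairs:
--             if p == pair:
--                 trade_order[p] = "buy"
--             else:
--                 trade_order[pair] = "sell"
--
--     return trade_order
-- ===== SOURCE B (Python) =====
-- def trade_ordering(arbitrage_pairs):
--     # Single pass: every distinct pair is "sell", then the last element is flipped to "buy".
--     trade_order = {pair: "sell" for pair in arbitrage_pairs}
--     if arbitrage_pairs: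
--         trade_order[arbitrage_pairs[-1]] = "buy"
--     return trade_order
-- ===== Notes on version B (the rewrite author's own statement) =====
-- stated objective: faster
-- what changed: Replaced the quadratic nested loops (which repeatedly overwrite each key, the last inner write winning) by a single dict comprehension marking every pair 'sell' plus one overwrite of the last element to 'buy'.
import Mathlib
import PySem

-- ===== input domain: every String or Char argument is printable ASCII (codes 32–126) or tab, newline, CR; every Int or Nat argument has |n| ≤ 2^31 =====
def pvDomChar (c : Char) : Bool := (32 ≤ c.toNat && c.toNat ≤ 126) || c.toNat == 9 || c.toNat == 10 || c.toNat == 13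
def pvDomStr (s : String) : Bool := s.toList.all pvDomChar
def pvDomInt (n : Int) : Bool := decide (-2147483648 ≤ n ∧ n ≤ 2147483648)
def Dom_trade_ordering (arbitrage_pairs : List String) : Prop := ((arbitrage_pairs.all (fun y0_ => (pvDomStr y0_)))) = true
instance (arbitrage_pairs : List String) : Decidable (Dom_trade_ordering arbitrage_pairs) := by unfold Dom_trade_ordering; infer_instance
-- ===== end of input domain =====

-- B replaces A's O(n^2) nested loops by one pass: all pairs "sell", then the last element becomes "buy" (objective: faster, asymptotic).

-- ===== PORT A =====
def trade_ordering (arbitrage_pairs : List String) : List (String × String) :=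
  (arbitrage_pairs.foldl (fun trade_order pair =>
      arbitrage_pairs.foldl (fun trade_order p =>
        if p == pair then trade_order.insert p "buy" else trade_order.insert pair "sell")
        trade_order)
    (PySem.Dict.empty)).items

-- ===== PORT B =====
-- the 'if arbitrage_pairs:' guard and 'arbitrage_pairs[-1]' are fused into one match on
-- PySem.List.pyGet? _ (-1), which is none exactly when the list is empty
def trade_ordering_alt (arbitrage_pairs : List String) : List (String × String) :=
  let trade_order := arbitrage_pairs.foldl (fun d pair => d.insert pair "sell") PySem.Dict.empty
  match PySem.List.pyGet? arbitrage_pairs (-1) with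
  | some last => (trade_order.insert last "buy").items
  | none => trade_order.items

-- ===== PRECONDITION & SPEC =====
def Spec_trade_ordering (arbitrage_pairs : List String) (out : List (String × String)) : Prop := out = trade_ordering_alt arbitrage_pairs
instance (arbitrage_pairs : List String) (out : List (String × String)) : Decidable (Spec_trade_ordering arbitrage_pairs out) := by unfold Spec_trade_ordering; infer_instance

-- ===== CLAIM (what is proved, stated in full; the proofs are below) =====
def Claim_equal_trade_ordering : Prop := ∀ (arbitrage_pairs : List String), Dom_trade_ordering arbitrage_pairs → Spec_trade_ordering arbitrage_pairs (trade_ordering arbitrage_pairs)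

-- ===== LEMMAS AND PROOFS =====

-- A's inner loop writes only the key `pair`; the last write wins, so it collapses to one insert
-- whose value is decided by the last element of the scanned list.
theorem inner_collapse (xs : List String) (x pair : String) (d : PySem.Dict String String) :
    List.foldl (fun d p => if p == pair then d.insert p "buy" else d.insert pair "sell") d (x :: xs)
    = d.insert pair (if xs.getLastD x == pair then "buy" else "sell") := by
  induction xs generalizing x d with
  | nil =>
    simp only [List.foldl, List.getLastD]
    by_cases h : x = pair <;> simp [h]
  | cons y ys ih =>
    rw [List.foldl_cons, ih y, List.getLastD_cons]
    by_cases h : x = pair <;>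
      simp [h, PySem.Dict.insert_insert_self]

-- a fold of inserts whose value depends only on the key: last write wins, value is g k
theorem getD_foldl_insert_fun (xs : List String) (g : String → String)
    (d : PySem.Dict String String) (k d0 : String) :
    (xs.foldl (fun d p => d.insert p (g p)) d).getD k d0
      = if k ∈ xs then g k else d.getD k d0 := by
  induction xs generalizing d with
  | nil => simp
  | cons x xs ih =>
    rw [List.foldl_cons, ih]
    by_cases hm : k ∈ xs
    · simp [hm]
    · by_cases he : k = x <;> simp [hm, he, PySem.Dict.getD_insert]

-- ===== VERDICT (by name: the statement is the Claim_ definition above) =====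
theorem trade_ordering_spec : Claim_equal_trade_ordering := by
  intro pairs _
  unfold Spec_trade_ordering trade_ordering trade_ordering_alt
  cases pairs with
  | nil => rfl
  | cons x xs =>
    have hLmem : xs.getLastD x ∈ x :: xs := List.getLastD_mem_cons
    have hlast : (x :: xs).getLast? = some (xs.getLastD x) := by
      simp [List.getLast?_cons, List.getLastD_eq_getLast?]
    set L : String := xs.getLastD x with hL
    set gA : String → String := fun pair => if L == pair then "buy" else "sell" with hgA
    -- collapse A's outer fold to single inserts whose value is decided by the last element L
    have hA : List.foldl (fun d pair =>
        List.foldl (fun d p => if p == pair then d.insert p "buy" else d.insert pair "sell") d (x :: xs))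
        PySem.Dict.empty (x :: xs)
        = List.foldl (fun d pair => d.insert pair (gA pair)) PySem.Dict.empty (x :: xs) := by
      apply PySem.List.foldl_congr_mem
      intro d pair _
      exact inner_collapse xs x pair d
    rw [hA, PySem.List.pyGet?_neg_one, hlast]
    set dA := List.foldl (fun d pair => d.insert pair (gA pair)) PySem.Dict.empty (x :: xs) with hdA
    set dS := List.foldl (fun d pair => d.insert pair "sell") PySem.Dict.empty (x :: xs) with hdS
    show dA.items = (dS.insert L "buy").items
    have keysA : dA.keys = PySem.Set.ofList (x :: xs) := by
      rw [hdA, PySem.Dict.keys_foldl_insert (f := fun _ p => gA p), PySem.Set.ofList_eq_foldl]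
      rfl
    have keysS : dS.keys = PySem.Set.ofList (x :: xs) := by
      rw [hdS, PySem.Dict.keys_foldl_insert (f := fun _ _ => "sell"), PySem.Set.ofList_eq_foldl]
      rfl
    have nodupA : dA.keys.Nodup := by
      rw [keysA]; exact PySem.Set.nodup_ofList _
    have hcontS : dS.contains L = true := by
      rw [PySem.Dict.contains_iff_mem_keys, keysS]
      exact (PySem.Set.mem_ofList _ _).mpr hLmem
    have keysB : (dS.insert L "buy").keys = PySem.Set.ofList (x :: xs) := by
      rw [PySem.Dict.keys_insert_of_contains dS "buy" hcontS, keysS]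
    have nodupB : (dS.insert L "buy").keys.Nodup := by
      rw [keysB]; exact PySem.Set.nodup_ofList _
    rw [PySem.Dict.items_eq_map_keys dA nodupA "",
        PySem.Dict.items_eq_map_keys (dS.insert L "buy") nodupB "",
        keysA, keysB]
    apply List.map_congr_left
    intro k hk
    have hkmem : k ∈ x :: xs := (PySem.Set.mem_ofList _ _).mp hk
    have hgetA : dA.getD k "" = gA k := by
      rw [hdA, getD_foldl_insert_fun]; simp [hkmem]
    have hgetS : dS.getD k "" = "sell" := by
      rw [hdS, getD_foldl_insert_fun (g := fun _ => "sell")]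
      simp [hkmem]
    rw [hgetA, PySem.Dict.getD_insert]
    by_cases he : k = L
    · simp [he, hgA]
    · have hne : ¬ (L = k) := fun h => he h.symm
      simp [he, hgA, hne, hgetS]
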